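-- pv_equiv track=rewrite | github.com/andywiecko/Wstep-do-programowania | Lekcja08/col1.py | Rownanie
-- ===== SOURCE A (Python) =====
-- def Rownanie(n):
--     rozwiazania = []
--     for x in range(n+1):
--         for y in range(n+1):
--             LHS = x**2+y**2
--             RHS = 19*x+13*y
--             if LHS == RHS:
--                 rozwiazania.append([x,y])
--
--     return rozwiazania
-- ===== SOURCE B (Python) =====
-- def _isqrt(d):
--     # integer square root by counting up (d is at most 530 here)
--     r = 0
--     while (r + 1) * (r + 1) <= d:
--         r += 1
--     return r
--
--
-- def Rownanie(n):
--     # Per x, solve the resulting quadratic in y via its discriminant.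
--     rozwiazania = []
--     for x in range(n + 1):
--         D = 169 + 76 * x - 4 * x * x
--         if D < 0:
--             continue
--         r = _isqrt(D)
--         if r * r != D:
--             continue
--         if (13 - r) % 2 != 0:
--             continue
--         y1 = (13 - r) // 2
--         y2 = (13 + r) // 2
--         if 0 <= y1 <= n:
--             rozwiazania.append([x, y1])
--         if r != 0 and 0 <= y2 <= n:
--             rozwiazania.append([x, y2])
--     return rozwiazania
-- ===== Notes on version B (the rewrite author's own statement) =====
-- stated objective: faster
-- what changed: B drops A's inner scan over y: for each candidate x it solves the resulting quadratic in y via its discriminant and an integer perfect-square check, emitting the at most two roots in ascending order.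
import Mathlib
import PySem

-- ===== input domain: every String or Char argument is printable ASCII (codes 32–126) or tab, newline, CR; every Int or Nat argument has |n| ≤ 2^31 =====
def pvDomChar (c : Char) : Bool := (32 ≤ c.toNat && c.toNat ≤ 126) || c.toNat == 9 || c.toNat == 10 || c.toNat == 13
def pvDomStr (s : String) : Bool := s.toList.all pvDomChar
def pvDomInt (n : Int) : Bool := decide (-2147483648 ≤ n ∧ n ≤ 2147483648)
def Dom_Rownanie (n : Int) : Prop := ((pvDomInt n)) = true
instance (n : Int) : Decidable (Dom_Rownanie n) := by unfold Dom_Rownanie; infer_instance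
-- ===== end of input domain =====

-- B replaces A's double scan of the grid by solving, per x, the quadratic in y via its
-- discriminant and a perfect-square test; objective: faster.

-- ===== PORT A =====
def Rownanie (n : Int) : List (List Int) :=
  (PySem.List.pyRange 0 (n+1) 1).foldl (fun rozwiazania x =>
    (PySem.List.pyRange 0 (n+1) 1).foldl (fun rozwiazania y =>
      let LHS := x^2 + y^2
      let RHS := 19*x + 13*y
      if LHS = RHS then rozwiazania ++ [[x, y]] else rozwiazania) rozwiazania) []

-- ===== PORT B =====
-- _isqrt: count r upward while (r+1)^2 ≤ d; fuel d.toNat bounds the iterations ((r+1)^2 ≤ d forces r+1 ≤ d)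
def isqrtAux (d : Int) : Nat → Int → Int
  | 0, r => r
  | fuel+1, r => if (r+1)*(r+1) ≤ d then isqrtAux d fuel (r+1) else r

def pyIsqrt (d : Int) : Int := isqrtAux d d.toNat 0

def Rownanie_alt (n : Int) : List (List Int) :=
  (PySem.List.pyRange 0 (n+1) 1).foldl (fun rozwiazania x =>
    let D := 169 + 76*x - 4*x*x
    if D < 0 then rozwiazania
    else
      let r := pyIsqrt D
      if r * r ≠ D then rozwiazania
      else if PySem.Int.mod (13 - r) 2 ≠ 0 then rozwiazania
      else
        let y1 := PySem.Int.floordiv (13 - r) 2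
        let y2 := PySem.Int.floordiv (13 + r) 2
        let rozwiazania := if 0 ≤ y1 ∧ y1 ≤ n then rozwiazania ++ [[x, y1]] else rozwiazania
        if r ≠ 0 ∧ 0 ≤ y2 ∧ y2 ≤ n then rozwiazania ++ [[x, y2]] else rozwiazania) []

-- ===== PRECONDITION & SPEC =====
def Spec_Rownanie (n : Int) (out : List (List Int)) : Prop := out = Rownanie_alt n
instance (n : Int) (out : List (List Int)) : Decidable (Spec_Rownanie n out) := by unfold Spec_Rownanie; infer_instance

-- ===== CLAIM (what is proved, stated in full; the proofs are below) =====
def Claim_equal_Rownanie : Prop := ∀ (n : Int), Dom_Rownanie n → Spec_Rownanie n (Rownanie n)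

-- ===== LEMMAS AND PROOFS =====

-- what A's inner loop collects for a fixed x
def collectA (x n : Int) : List (List Int) :=
  ((PySem.List.pyRange 0 (n+1) 1).filter
    (fun y => decide (x^2 + y^2 = 19*x + 13*y))).map (fun y => [x, y])

-- what B emits for a fixed x
def emitB (x n : Int) : List (List Int) :=
  let D := 169 + 76*x - 4*x*x
  if D < 0 then []
  else
    let r := pyIsqrt D
    if r * r ≠ D then []
    else if PySem.Int.mod (13 - r) 2 ≠ 0 then []
    else
      let y1 := PySem.Int.floordiv (13 - r) 2
      let y2 := PySem.Int.floordiv (13 + r) 2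
      (if 0 ≤ y1 ∧ y1 ≤ n then [[x, y1]] else []) ++
      (if r ≠ 0 ∧ 0 ≤ y2 ∧ y2 ≤ n then [[x, y2]] else [])

lemma isqrtAux_ge (d : Int) : ∀ (fuel : Nat) (r : Int), r ≤ isqrtAux d fuel r := by
  intro fuel
  induction fuel with
  | zero => intro r; simp [isqrtAux]
  | succ k ih =>
    intro r
    simp only [isqrtAux]
    split
    · exact le_trans (by omega) (ih (r+1))
    · exact le_refl r

lemma isqrtAux_eq (d s : Int) (hs : 0 ≤ s) (hd : s * s = d) :
    ∀ (fuel : Nat) (r : Int), 0 ≤ r → r ≤ s → s ≤ r + fuel → isqrtAux d fuel r = s := by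
  intro fuel
  induction fuel with
  | zero => intro r _ h1 h2; simp [isqrtAux]; omega
  | succ k ih =>
    intro r hr0 hrs hsf
    simp only [isqrtAux]
    split
    · rename_i h
      have hlt : r < s := by
        rcases lt_or_eq_of_le hrs with h' | h'
        · exact h'
        · exfalso; subst h'; nlinarith
      exact ih (r+1) (by omega) (by omega) (by push_cast at hsf ⊢; omega)
    · rename_i h
      have : ¬ r < s := by
        intro hlt
        exact h (by nlinarith)
      omega

lemma pyIsqrt_sq (s : Int) (hs : 0 ≤ s) : pyIsqrt (s * s) = s := by
  unfold pyIsqrt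
  apply isqrtAux_eq (s*s) s hs rfl _ 0 le_rfl hs
  have h1 : s ≤ s * s := by nlinarith
  have h2 : ((s*s).toNat : Int) = s * s := Int.toNat_of_nonneg (by nlinarith)
  omega

lemma pyIsqrt_nonneg (d : Int) : 0 ≤ pyIsqrt d := isqrtAux_ge d d.toNat 0

-- the equation in y, for fixed x, is (2y-13)^2 = D
lemma cond_iff (x y : Int) :
    x^2 + y^2 = 19*x + 13*y ↔ (2*y - 13) * (2*y - 13) = 169 + 76*x - 4*x*x := by
  constructor <;> intro h <;> nlinarith

-- filtering the range 0..N-1 for two distinct target values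
lemma filter_range_two (N : Nat) (a b : Int) (hab : a < b) :
    (PySem.List.pyRange 0 (N : Int) 1).filter (fun y => decide (y = a ∨ y = b)) =
      (if 0 ≤ a ∧ a < (N : Int) then [a] else []) ++
      (if 0 ≤ b ∧ b < (N : Int) then [b] else []) := by
  induction N with
  | zero =>
    rw [PySem.List.pyRange_one_eq_nil (by omega)]
    simp only [List.filter_nil, Nat.cast_zero]
    rw [if_neg (by omega), if_neg (by omega)]
    rfl
  | succ k ih =>
    have hk0 : (0:Int) ≤ (k:Nat) := Int.natCast_nonneg k
    have hcast : ((k+1 : Nat) : Int) = (k : Int) + 1 := by push_cast; ring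
    rw [hcast, PySem.List.pyRange_one_succ_right hk0, List.filter_append, ih]
    simp only [List.filter_cons, List.filter_nil]
    by_cases h1 : (k:Int) = a
    · subst h1
      rw [if_neg (show ¬((0:Int) ≤ (k:Int) ∧ (k:Int) < (k:Int)) by omega),
          if_neg (show ¬((0:Int) ≤ b ∧ b < (k:Int)) by omega),
          if_pos (show (decide ((k:Int) = (k:Int) ∨ (k:Int) = b)) = true by simp),
          if_pos (show (0:Int) ≤ (k:Int) ∧ (k:Int) < (k:Int) + 1 by omega),
          if_neg (show ¬((0:Int) ≤ b ∧ b < (k:Int) + 1) by omega)]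
      simp
    · by_cases h2 : (k:Int) = b
      · subst h2
        rw [if_neg (show ¬((0:Int) ≤ (k:Int) ∧ (k:Int) < (k:Int)) by omega),
            if_pos (show (decide ((k:Int) = a ∨ (k:Int) = (k:Int))) = true by simp),
            if_pos (show (0:Int) ≤ (k:Int) ∧ (k:Int) < (k:Int) + 1 by omega)]
        by_cases ha : (0:Int) ≤ a ∧ a < (k:Int)
        · rw [if_pos ha, if_pos (show (0:Int) ≤ a ∧ a < (k:Int) + 1 by omega)]
          simp
        · rw [if_neg ha, if_neg (show ¬((0:Int) ≤ a ∧ a < (k:Int) + 1) by omega)]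
          simp
      · rw [if_neg (show ¬((decide ((k:Int) = a ∨ (k:Int) = b)) = true) by simp [h1, h2])]
        by_cases ha : (0:Int) ≤ a ∧ a < (k:Int) <;> by_cases hb : (0:Int) ≤ b ∧ b < (k:Int)
        · rw [if_pos ha, if_pos hb, if_pos (show (0:Int) ≤ a ∧ a < (k:Int) + 1 by omega),
              if_pos (show (0:Int) ≤ b ∧ b < (k:Int) + 1 by omega)]
          simp
        · rw [if_pos ha, if_neg hb, if_pos (show (0:Int) ≤ a ∧ a < (k:Int) + 1 by omega),
              if_neg (show ¬((0:Int) ≤ b ∧ b < (k:Int) + 1) by omega)]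
          simp
        · rw [if_neg ha, if_pos hb, if_neg (show ¬((0:Int) ≤ a ∧ a < (k:Int) + 1) by omega),
              if_pos (show (0:Int) ≤ b ∧ b < (k:Int) + 1 by omega)]
          simp
        · rw [if_neg ha, if_neg hb, if_neg (show ¬((0:Int) ≤ a ∧ a < (k:Int) + 1) by omega),
              if_neg (show ¬((0:Int) ≤ b ∧ b < (k:Int) + 1) by omega)]
          simp

lemma pyRange_zero_toNat (m : Int) :
    PySem.List.pyRange 0 m 1 = PySem.List.pyRange 0 ((m.toNat : Int)) 1 := by
  rw [PySem.List.pyRange_one, PySem.List.pyRange_one]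
  congr 2
  omega

-- the heart: for every x, A's inner scan over y produces exactly B's root list
lemma collect_eq_emit (x n : Int) : collectA x n = emitB x n := by
  unfold collectA emitB
  set D : Int := 169 + 76*x - 4*x*x with hD
  by_cases hDneg : D < 0
  · simp only [if_pos hDneg]
    rw [List.filter_eq_nil_iff.mpr, List.map_nil]
    intro y _
    simp only [decide_eq_true_eq]
    intro hc
    have h2 := (cond_iff x y).mp hc
    rw [← hD] at h2
    nlinarith [mul_self_nonneg (2*y - 13)]
  · simp only [if_neg hDneg]
    set r : Int := pyIsqrt D with hreq
    have hr0 : 0 ≤ r := pyIsqrt_nonneg D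
    by_cases hrr : r * r = D
    · -- perfect square: D is odd, so r = 2k+1 and the two roots are 6-k, k+7
      have hDodd : ¬ (2 ∣ D) := by
        obtain ⟨t, ht⟩ : ∃ t, x*x = t := ⟨_, rfl⟩
        have h4 : (4*x*x : Int) = 4*(x*x) := by ring
        rw [hD, h4, ht]
        omega
      have hrodd : ∃ k, r = 2*k + 1 := by
        rcases Int.even_or_odd r with ⟨m, hm⟩ | ⟨m, hm⟩
        · exact absurd ⟨(m*m)*2, by rw [← hrr, hm]; ring⟩ hDodd
        · exact ⟨m, by omega⟩
      obtain ⟨k, hk⟩ := hrodd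
      have hmod : PySem.Int.mod (13 - r) 2 = 0 :=
        (PySem.Int.mod_eq_zero_iff_dvd _ _).mpr ⟨6 - k, by omega⟩
      have hy1 : PySem.Int.floordiv (13 - r) 2 = 6 - k :=
        (PySem.Int.floordiv_eq_iff_of_pos (by norm_num)).mpr ⟨by omega, by omega⟩
      have hy2 : PySem.Int.floordiv (13 + r) 2 = k + 7 :=
        (PySem.Int.floordiv_eq_iff_of_pos (by norm_num)).mpr ⟨by omega, by omega⟩
      rw [if_neg (fun h => h hrr), if_neg (fun h => h hmod), hy1, hy2]
      have hpred : ∀ y ∈ PySem.List.pyRange 0 (n+1) 1,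
          (decide (x^2 + y^2 = 19*x + 13*y)) = (decide (y = 6 - k ∨ y = k + 7)) := by
        intro y _
        apply decide_eq_decide.mpr
        rw [cond_iff x y, ← hD]
        constructor
        · intro h2
          have h3 : (2*y - 13 - r) * (2*y - 13 + r) = 0 := by
            rw [← hrr] at h2; nlinarith
          rcases mul_eq_zero.mp h3 with h | h
          · right; omega
          · left; omega
        · rintro (h | h) <;> (rw [← hrr]; subst h; rw [hk]; ring)
      rw [List.filter_congr hpred, pyRange_zero_toNat (n+1),
          filter_range_two ((n+1).toNat) (6-k) (k+7) (by omega), List.map_append]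
      congr 1
      · split_ifs with g1 g2 <;> (try simp) <;> (exfalso; clear_value r D; omega)
      · split_ifs with g1 g2 <;> (try simp) <;> (exfalso; clear_value r D; omega)
    · -- not a perfect square: no y satisfies the equation
      rw [if_pos hrr]
      rw [List.filter_eq_nil_iff.mpr, List.map_nil]
      intro y _
      simp only [decide_eq_true_eq]
      intro hc
      have h2 := (cond_iff x y).mp hc
      rw [← hD] at h2
      have hs0 : 0 ≤ |2*y - 13| := abs_nonneg _
      have hss : |2*y - 13| * |2*y - 13| = D := by
        rw [abs_mul_abs_self]; exact h2
      apply hrr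
      rw [hreq]
      conv_lhs => rw [← hss]
      rw [pyIsqrt_sq _ hs0, hss]

lemma Rownanie_eq_flatMap (n : Int) :
    Rownanie n = (PySem.List.pyRange 0 (n+1) 1).flatMap (fun x => collectA x n) := by
  unfold Rownanie
  have step : ∀ (acc : List (List Int)) (x : Int), x ∈ PySem.List.pyRange 0 (n+1) 1 →
      (PySem.List.pyRange 0 (n+1) 1).foldl (fun rozwiazania y =>
        let LHS := x^2 + y^2
        let RHS := 19*x + 13*y
        if LHS = RHS then rozwiazania ++ [[x, y]] else rozwiazania) acc
      = acc ++ collectA x n := by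
    intro acc x _
    show (PySem.List.pyRange 0 (n+1) 1).foldl (fun rozwiazania y =>
        if x^2 + y^2 = 19*x + 13*y then rozwiazania ++ [[x, y]] else rozwiazania) acc
      = acc ++ collectA x n
    unfold collectA
    exact PySem.List.foldl_append_ite _ _ _ _
  refine (PySem.List.foldl_congr_mem _ _ _ (g := fun acc x => acc ++ collectA x n) step).trans ?_
  rw [PySem.List.foldl_append_eq_flatMap]
  simp

lemma Rownanie_alt_eq_flatMap (n : Int) :
    Rownanie_alt n = (PySem.List.pyRange 0 (n+1) 1).flatMap (fun x => emitB x n) := by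
  unfold Rownanie_alt
  have step : ∀ (acc : List (List Int)) (x : Int), x ∈ PySem.List.pyRange 0 (n+1) 1 →
      (let D := 169 + 76*x - 4*x*x
       if D < 0 then acc
       else
         let r := pyIsqrt D
         if r * r ≠ D then acc
         else if PySem.Int.mod (13 - r) 2 ≠ 0 then acc
         else
           let y1 := PySem.Int.floordiv (13 - r) 2
           let y2 := PySem.Int.floordiv (13 + r) 2
           let acc' := if 0 ≤ y1 ∧ y1 ≤ n then acc ++ [[x, y1]] else acc
           if r ≠ 0 ∧ 0 ≤ y2 ∧ y2 ≤ n then acc' ++ [[x, y2]] else acc')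
      = acc ++ emitB x n := by
    intro acc x _
    unfold emitB
    dsimp only
    split_ifs <;> simp
  refine (PySem.List.foldl_congr_mem _ _ _ (g := fun acc x => acc ++ emitB x n) step).trans ?_
  rw [PySem.List.foldl_append_eq_flatMap]
  simp

-- ===== VERDICT (by name: the statement is the Claim_ definition above) =====
theorem Rownanie_spec : Claim_equal_Rownanie := by
  intro n _
  unfold Spec_Rownanie
  rw [Rownanie_eq_flatMap, Rownanie_alt_eq_flatMap]
  congr 1
  funext x
  exact collect_eq_emit x n
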